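/-
  jsmn: what the proofs of `jsmn_parse_primitive` (both binaries) need besides the machine walk.
    ToksArg.frame        the `tokens` argument (NULL or an array) through stores elsewhere (a `v3_frame` rule)
    text_read            `js[pos]` as the machine reads it
    primScan_*           one trip of the model's scanning loop, case by case, in the shape the branches of the machine code give
    primStop_*           the `switch`: which characters stop a primitive
-/
import Prog.Jsmn.State

namespace X86
namespace J6
open X86.User (CodeAt RegsKept Span FlagsOK Layout toNat_add_ofNat toNat_ofNat_lt' add_ofNat_add)
open Jsmn

set_option linter.unusedVariables false

/-- `js[pos]` as the machine reads it (`movzx ecx, BYTE PTR [r9 + rcx]`). -/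
theorem text_read {μ : User.Mem} {jsA : Word} {js : List UInt8} (h : CodeAt μ jsA js) (pos : Nat) (hpos : pos < js.length) :
    μ.readLE (jsA + UInt64.ofNat pos) 1 = (charAt js pos).toNat := by
  rw [User.Mem.readLE_one', h pos hpos]
  simp [charAt, hpos]

/-! ### The model's scanning loop, one trip -/

theorem more_false_of_len {js : List UInt8} {pos : Nat} (h : js.length ≤ pos) : more js pos = false := by
  simp [more]; intro h'; omega

theorem more_false_of_nul {js : List UInt8} {pos : Nat} (h : (charAt js pos).toNat = 0) : more js pos = false := by
  have : charAt js pos = 0 := UInt8.toNat_inj.mp h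
  simp [more, this]

theorem more_true {js : List UInt8} {pos : Nat} (h1 : pos < js.length) (h2 : (charAt js pos).toNat ≠ 0) : more js pos = true := by
  have : charAt js pos ≠ 0 := fun e => h2 (by rw [e]; rfl)
  simp [more, h1, this]

theorem primScan_eoi {cfg : Jsmn.Config} {js : List UInt8} {k pos : Nat} (h : more js pos = false) :
    primScan cfg js (k + 1) pos = some (.eoi pos) := by
  simp [primScan, h]

theorem primScan_found {cfg : Jsmn.Config} {js : List UInt8} {k pos : Nat} (h : more js pos = true) (hs : primStop cfg (charAt js pos) = true) :
    primScan cfg js (k + 1) pos = some (.found pos) := by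
  simp [primScan, h, hs]

theorem primScan_bad {cfg : Jsmn.Config} {js : List UInt8} {k pos : Nat} (h : more js pos = true) (hs : primStop cfg (charAt js pos) = false)
    (hb : (charAt js pos).toNat < 32 ∨ 127 ≤ (charAt js pos).toNat) : primScan cfg js (k + 1) pos = some .bad := by
  simp [primScan, h, hs]
  intro h1; omega

theorem primScan_next {cfg : Jsmn.Config} {js : List UInt8} {k pos : Nat} (h : more js pos = true) (hs : primStop cfg (charAt js pos) = false)
    (h1 : 32 ≤ (charAt js pos).toNat) (h2 : (charAt js pos).toNat < 127) :
    primScan cfg js (k + 1) pos = primScan cfg js k (u32 (pos + 1)) := by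
  have hn : ¬ ((charAt js pos).toNat < 32 ∨ 127 ≤ (charAt js pos).toNat) := by omega
  simp [primScan, h, hs]
  intro h3; omega

/-- The stop characters of the default configuration, as numbers. -/
theorem primStop_default_iff (c : UInt8) :
    primStop Config.default c = true ↔ (c.toNat = 0x3a ∨ c.toNat = 0x09 ∨ c.toNat = 0x0d ∨ c.toNat = 0x0a ∨ c.toNat = 0x20 ∨ c.toNat = 0x2c ∨
      c.toNat = 0x5d ∨ c.toNat = 0x7d) := by
  simp only [primStop, Config.default, Bool.not_false, Bool.true_and, byte_beq_eq_decide]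
  simp [or_assoc]

theorem primStop_default_not (c : UInt8) (h : ¬ (c.toNat = 0x3a ∨ c.toNat = 0x09 ∨ c.toNat = 0x0d ∨ c.toNat = 0x0a ∨ c.toNat = 0x20 ∨
    c.toNat = 0x2c ∨ c.toNat = 0x5d ∨ c.toNat = 0x7d)) : primStop Config.default c = false :=
  Bool.eq_false_iff.mpr (mt (primStop_default_iff c).mp h)

/-- The stop characters of the strict configuration, as numbers. -/
theorem primStop_strict_iff (c : UInt8) :
    primStop Config.strictLinks c = true ↔ (c.toNat = 0x09 ∨ c.toNat = 0x0d ∨ c.toNat = 0x0a ∨ c.toNat = 0x20 ∨ c.toNat = 0x2c ∨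
      c.toNat = 0x5d ∨ c.toNat = 0x7d) := by
  simp only [primStop, Config.strictLinks, Bool.not_true, Bool.false_and, Bool.false_or, byte_beq_eq_decide]
  simp [or_assoc]

theorem primStop_strict_not (c : UInt8) (h : ¬ (c.toNat = 0x09 ∨ c.toNat = 0x0d ∨ c.toNat = 0x0a ∨ c.toNat = 0x20 ∨
    c.toNat = 0x2c ∨ c.toNat = 0x5d ∨ c.toNat = 0x7d)) : primStop Config.strictLinks c = false :=
  Bool.eq_false_iff.mpr (mt (primStop_strict_iff c).mp h)

end J6
end X86

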